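-- pv_equiv track=rewrite | github.com/Yixian-ch/luxury-product-search | server/python/services/query_processor.py | sort_by_french_first
-- ===== SOURCE A (Python) =====
-- def sort_by_french_first(items: list, brand_domain: str) -> list:
--     """
--     對搜索結果排序：法國官網優先，其他官網其次
--
--     目前僅對 Dior 品牌啟用此功能
--     不會過濾掉非法國結果，而是排序後全部返回
--
--     Args:
--         items: 搜索結果列表，每項應包含 'link' 字段
--         brand_domain: 品牌官網域名
--
--     Returns:
--         排序後的結果列表
--     """
--     if brand_domain != 'dior.com':
--         return items
--
--     # 分類：法國官網 vs 其他
--     french_items = []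
--     other_items = []
--
--     for item in items:
--         link = (item.get('link') or '').lower()
--         if '/fr_fr/' in link:
--             french_items.append(item)
--         else:
--             other_items.append(item)
--
--     # 法國官網優先返回
--     return french_items + other_items
-- ===== SOURCE B (Python) =====
-- def sort_by_french_first(items: list, brand_domain: str) -> list:
--     """Dior only: French-site results first, via one stable sort with a 0/1 key."""
--     if brand_domain != 'dior.com':
--         return items
--     return sorted(items, key=lambda item: 0 if '/fr_fr/' in (item.get('link') or '').lower() else 1)
-- ===== Notes on version B (the rewrite author's own statement) =====
-- stated objective: idiomatic
-- what changed: Replaced the explicit two-list partition-and-concatenate loop with a single stable sorted() call keyed 0 for '/fr_fr/' links and 1 otherwise; stability yields the identical order.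
import Mathlib
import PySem

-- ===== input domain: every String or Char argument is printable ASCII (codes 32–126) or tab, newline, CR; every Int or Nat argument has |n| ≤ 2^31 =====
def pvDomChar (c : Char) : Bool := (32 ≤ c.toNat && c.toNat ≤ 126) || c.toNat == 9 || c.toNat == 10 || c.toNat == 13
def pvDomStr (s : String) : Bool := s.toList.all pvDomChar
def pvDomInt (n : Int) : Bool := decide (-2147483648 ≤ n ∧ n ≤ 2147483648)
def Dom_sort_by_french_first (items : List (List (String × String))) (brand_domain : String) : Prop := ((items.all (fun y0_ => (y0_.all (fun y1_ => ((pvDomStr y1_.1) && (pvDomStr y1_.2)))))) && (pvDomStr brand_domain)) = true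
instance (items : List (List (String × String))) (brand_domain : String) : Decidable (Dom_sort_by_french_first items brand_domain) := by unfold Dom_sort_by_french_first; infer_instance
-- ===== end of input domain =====

-- B replaces A's explicit two-list partition + concatenation by one stable sort with a 0/1 key (idiomatic, same behaviour).


-- ===== PORT A =====
-- link = (item.get('link') or '').lower(); '/fr_fr/' in link
-- (`x or ''` only changes the result when x is None or '', both of which yield '', i.e. exactly getD "link" "")
def pvIsFr (item : List (String × String)) : Bool :=
  PySem.Str.isIn "/fr_fr/" (PySem.Str.lower ((PySem.Dict.mk item).getD "link" ""))

def sort_by_french_first (items : List (List (String × String))) (brand_domain : String) : List (List (String × String)) :=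
  if brand_domain ≠ "dior.com" then items
  else
    -- french_items / other_items accumulated by one pass, then concatenated
    let fo := items.foldl
      (fun (fo : List (List (String × String)) × List (List (String × String))) item =>
        if pvIsFr item then (fo.1 ++ [item], fo.2) else (fo.1, fo.2 ++ [item]))
      ([], [])
    fo.1 ++ fo.2

-- ===== PORT B =====
-- key = 0 if '/fr_fr/' in link else 1
def pvKey (item : List (String × String)) : Int := if pvIsFr item then 0 else 1

def sort_by_french_first_alt (items : List (List (String × String))) (brand_domain : String) : List (List (String × String)) :=
  if brand_domain ≠ "dior.com" then items
  else PySem.List.sorted items pvKey false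

-- ===== PRECONDITION & SPEC =====
def Spec_sort_by_french_first (items : List (List (String × String))) (brand_domain : String) (out : List (List (String × String))) : Prop := out = sort_by_french_first_alt items brand_domain
instance (items : List (List (String × String))) (brand_domain : String) (out : List (List (String × String))) : Decidable (Spec_sort_by_french_first items brand_domain out) := by unfold Spec_sort_by_french_first; infer_instance

-- ===== CLAIM (what is proved, stated in full; the proofs are below) =====
def Claim_equal_sort_by_french_first : Prop := ∀ (items : List (List (String × String))) (brand_domain : String), Dom_sort_by_french_first items brand_domain → Spec_sort_by_french_first items brand_domain (sort_by_french_first items brand_domain)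

-- ===== LEMMAS AND PROOFS =====

-- stable insertion puts x after every y with `before x y = false` and before every y with `before x y = true`
theorem insertBy_append_mid {α : Type} (before : α → α → Bool) (x : α) (F O : List α)
    (hF : ∀ y ∈ F, before x y = false) (hO : ∀ y ∈ O, before x y = true) :
    PySem.List.insertBy before x (F ++ O) = F ++ x :: O := by
  induction F with
  | nil =>
    cases O with
    | nil => simp [PySem.List.insertBy]
    | cons y ys => simp [PySem.List.insertBy, hO y (by simp)]
  | cons f F' ih =>
    have h := hF f (by simp)
    simp [PySem.List.insertBy, h]
    exact ih (fun y hy => hF y (by simp [hy]))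

-- loop invariant: inserting by the 0/1 key into F ++ O matches A's partition fold started at (F, O)
theorem foldl_insertBy_partition (items : List (List (String × String)))
    (F O : List (List (String × String)))
    (hF : ∀ y ∈ F, pvIsFr y = true) (hO : ∀ y ∈ O, pvIsFr y = false) :
    items.foldl (fun acc x => PySem.List.insertBy (fun a b => decide (pvKey a < pvKey b)) x acc) (F ++ O)
    = (items.foldl
        (fun (fo : List (List (String × String)) × List (List (String × String))) item =>
          if pvIsFr item then (fo.1 ++ [item], fo.2) else (fo.1, fo.2 ++ [item]))
        (F, O)).1
      ++ (items.foldl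
        (fun (fo : List (List (String × String)) × List (List (String × String))) item =>
          if pvIsFr item then (fo.1 ++ [item], fo.2) else (fo.1, fo.2 ++ [item]))
        (F, O)).2 := by
  induction items generalizing F O with
  | nil => simp
  | cons x t ih =>
    by_cases h : pvIsFr x
    · have hins : PySem.List.insertBy (fun a b => decide (pvKey a < pvKey b)) x (F ++ O) = (F ++ [x]) ++ O := by
        rw [insertBy_append_mid]
        · simp
        · intro y hy; simp [pvKey, h, hF y hy]
        · intro y hy; simp [pvKey, h, hO y hy]
      simp only [List.foldl_cons, h, if_pos, hins]
      simpa using ih (F ++ [x]) O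
        (fun y hy => by rcases List.mem_append.mp hy with hy | hy
                        · exact hF y hy
                        · simp at hy; subst hy; simpa using h)
        hO
    · have hins : PySem.List.insertBy (fun a b => decide (pvKey a < pvKey b)) x (F ++ O) = F ++ (O ++ [x]) := by
        rw [PySem.List.insertBy_of_forall_not_before]
        · simp
        · intro y hy
          simp [pvKey, h]
          split <;> omega
      simp only [List.foldl_cons, h, hins]
      simpa using ih F (O ++ [x]) hF
        (fun y hy => by rcases List.mem_append.mp hy with hy | hy
                        · exact hO y hy
                        · simp at hy; subst hy; simpa using h)

-- ===== VERDICT (by name: the statement is the Claim_ definition above) =====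
theorem sort_by_french_first_spec : Claim_equal_sort_by_french_first := by
  intro items brand_domain _
  unfold Spec_sort_by_french_first sort_by_french_first sort_by_french_first_alt
  split
  · rfl
  · rw [PySem.List.sorted_eq_foldl_insertBy]
    simpa using (foldl_insertBy_partition items [] [] (by simp) (by simp)).symm
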